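-- pv_equiv track=rewrite | github.com/bldxspark/KapYah-LogMiner | python_engine/analyzer.py | _infer_imu_count_from_messages
-- ===== SOURCE A (Python) =====
-- from collections import Counter
--
-- def _infer_imu_count_from_messages(message_counts: Counter[str]) -> int | None:
--     scaled_matches = set()
--     imu_matches = set()
--
--     for message_name, count in message_counts.items():
--         if count <= 0:
--             continue
--
--         if message_name == "HIGHRES_IMU":
--             scaled_matches.add(0)
--             continue
--
--         if message_name == "SCALED_IMU":
--             scaled_matches.add(0)
--             continue
--
--         if message_name.startswith("SCALED_IMU"):
--             suffix = message_name.removeprefix("SCALED_IMU")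
--             if suffix.isdigit():
--                 scaled_matches.add(int(suffix) - 1)
--                 continue
--
--         if message_name.startswith("IMU"):
--             suffix = message_name.removeprefix("IMU")
--             if suffix.isdigit():
--                 imu_matches.add(int(suffix))
--
--     inferred = scaled_matches or imu_matches
--     return (max(inferred) + 1) if inferred else None
-- ===== SOURCE B (Python) =====
-- def _rank(name):
--     """(priority, index): scaled messages outrank plain IMU<N> ones."""
--     if name in ("HIGHRES_IMU", "SCALED_IMU"):
--         return (1, 0)
--     if name.startswith("SCALED_IMU") and name[10:].isdigit():
--         return (1, int(name[10:]) - 1)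
--     if name.startswith("IMU") and name[3:].isdigit():
--         return (0, int(name[3:]))
--     return None
--
--
-- def _infer_imu_count_from_messages(message_counts):
--     # One running lexicographic maximum over (priority, index) ranks replaces
--     # A's two accumulator sets and its first-nonempty choice between them.
--     best = None
--     for message_name, count in message_counts.items():
--         if count <= 0:
--             continue
--         k = _rank(message_name)
--         if k is not None and (best is None or k > best):
--             best = k
--     return None if best is None else best[1] + 1
-- ===== Notes on version B (the rewrite author's own statement) =====
-- stated objective: alternative
-- what changed: Replaces A's two accumulator sets and its first-nonempty-set-then-max selection by mapping each name to a single (priority, index) rank and keeping one running lexicographic maximum, so the scaled-over-imu preference is encoded in the order rather than in a set choice.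
import Mathlib
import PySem

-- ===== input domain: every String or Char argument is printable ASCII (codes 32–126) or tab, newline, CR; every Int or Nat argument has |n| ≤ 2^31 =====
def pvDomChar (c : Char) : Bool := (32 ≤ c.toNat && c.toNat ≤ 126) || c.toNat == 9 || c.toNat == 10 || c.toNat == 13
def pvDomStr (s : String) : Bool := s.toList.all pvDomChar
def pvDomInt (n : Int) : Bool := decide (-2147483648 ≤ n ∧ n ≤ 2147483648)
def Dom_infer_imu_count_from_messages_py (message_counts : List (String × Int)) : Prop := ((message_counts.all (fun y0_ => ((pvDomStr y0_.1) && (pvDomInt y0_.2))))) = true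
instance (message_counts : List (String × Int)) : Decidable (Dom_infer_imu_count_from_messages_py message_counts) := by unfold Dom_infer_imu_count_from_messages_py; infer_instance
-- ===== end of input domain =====

-- B maps each name to a single (priority, index) rank and keeps one running
-- lexicographic maximum, instead of A's two accumulator sets and the
-- first-nonempty-set-then-max selection; objective: alternative. Return values only.

-- ===== PORT A =====
-- one loop iteration of A: the branch cascade over (message_name, count).
-- 'removeprefix' after a successful startswith is exactly 'toList.drop |prefix|'.
def pvStepA (st : PySem.Set Int × PySem.Set Int) (p : String × Int) :
    PySem.Set Int × PySem.Set Int :=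
  let scaled_matches := st.1
  let imu_matches := st.2
  let message_name := p.1
  if p.2 ≤ 0 then (scaled_matches, imu_matches)
  else if message_name = "HIGHRES_IMU" then (PySem.Set.add scaled_matches 0, imu_matches)
  else if message_name = "SCALED_IMU" then (PySem.Set.add scaled_matches 0, imu_matches)
  else if PySem.Str.startswith message_name "SCALED_IMU" &&
          PySem.Chars.strIsdigit (message_name.toList.drop 10) then
    (PySem.Set.add scaled_matches ((PySem.Int.ofChars? (message_name.toList.drop 10)).getD 0 - 1),
     imu_matches)
  else if PySem.Str.startswith message_name "IMU" &&
          PySem.Chars.strIsdigit (message_name.toList.drop 3) then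
    (scaled_matches, PySem.Set.add imu_matches ((PySem.Int.ofChars? (message_name.toList.drop 3)).getD 0))
  else (scaled_matches, imu_matches)

def infer_imu_count_from_messages_py (message_counts : List (String × Int)) : Option Int :=
  let r := message_counts.foldl pvStepA (([] : PySem.Set Int), ([] : PySem.Set Int))
  -- inferred = scaled_matches or imu_matches
  let inferred : PySem.Set Int := if r.1 ≠ [] then r.1 else r.2
  match PySem.List.max? inferred (fun x => x) with
  | some m => some (m + 1)
  | none => none

-- ===== PORT B =====
-- B's helper _rank: name ↦ (priority, index) or None; scaled outranks imu.
def pvRank (name : String) : Option (Int × Int) :=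
  if name = "HIGHRES_IMU" || name = "SCALED_IMU" then some (1, 0)
  else if PySem.Str.startswith name "SCALED_IMU" &&
          PySem.Chars.strIsdigit (name.toList.drop 10) then
    some (1, (PySem.Int.ofChars? (name.toList.drop 10)).getD 0 - 1)
  else if PySem.Str.startswith name "IMU" &&
          PySem.Chars.strIsdigit (name.toList.drop 3) then
    some (0, (PySem.Int.ofChars? (name.toList.drop 3)).getD 0)
  else none

-- Python's tuple comparison 'k > best' on Int pairs is lexicographic.
def pvGtPair (k b : Int × Int) : Bool :=
  b.1 < k.1 || (b.1 = k.1 && b.2 < k.2)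

-- one loop iteration of B: update the running lexicographic maximum.
def pvStepB (best : Option (Int × Int)) (p : String × Int) : Option (Int × Int) :=
  if p.2 ≤ 0 then best
  else
    match pvRank p.1 with
    | none => best
    | some k =>
      match best with
      | none => some k
      | some b => if pvGtPair k b then some k else best

def infer_imu_count_from_messages_py_alt (message_counts : List (String × Int)) : Option Int :=
  match message_counts.foldl pvStepB none with
  | none => none
  | some b => some (b.2 + 1)

-- ===== PRECONDITION & SPEC =====
def Spec_infer_imu_count_from_messages_py (message_counts : List (String × Int)) (out : Option Int) : Prop := out = infer_imu_count_from_messages_py_alt message_counts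
instance (message_counts : List (String × Int)) (out : Option Int) : Decidable (Spec_infer_imu_count_from_messages_py message_counts out) := by unfold Spec_infer_imu_count_from_messages_py; infer_instance

-- ===== CLAIM (what is proved, stated in full; the proofs are below) =====
def Claim_equal_infer_imu_count_from_messages_py : Prop := ∀ (message_counts : List (String × Int)), Dom_infer_imu_count_from_messages_py message_counts → Spec_infer_imu_count_from_messages_py message_counts (infer_imu_count_from_messages_py message_counts)

-- ===== LEMMAS AND PROOFS =====

-- the scaled / imu index lists contributed by the positive-count entries of l
def pvScaled (l : List (String × Int)) : List Int :=
  (l.filter (fun p => decide (0 < p.2))).filterMap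
    (fun p => (pvRank p.1).bind (fun k => if k.1 = 1 then some k.2 else none))

def pvImu (l : List (String × Int)) : List Int :=
  (l.filter (fun p => decide (0 < p.2))).filterMap
    (fun p => (pvRank p.1).bind (fun k => if k.1 = 0 then some k.2 else none))

theorem pvStepA_eq (s i : PySem.Set Int) (p : String × Int) :
    pvStepA (s, i) p =
      if 0 < p.2 then
        match pvRank p.1 with
        | some k => if k.1 = 1 then (PySem.Set.add s k.2, i) else (s, PySem.Set.add i k.2)
        | none => (s, i)
      else (s, i) := by
  unfold pvStepA pvRank
  by_cases h0 : p.2 ≤ 0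
  · have h0' : ¬ (0 < p.2) := by omega
    simp [h0, h0']
  · have h0' : 0 < p.2 := by omega
    simp only [if_neg h0, if_pos h0']
    by_cases h1 : p.1 = "HIGHRES_IMU"
    · simp [h1]
    · by_cases h2 : p.1 = "SCALED_IMU"
      · simp [h2]
      · simp only [h1, h2, decide_false, Bool.or_false, Bool.false_eq_true, if_false]
        split_ifs <;> simp_all

theorem pvFoldA_eq (l : List (String × Int)) :
    ∀ (s i : PySem.Set Int),
      l.foldl pvStepA (s, i) = (PySem.Set.update s (pvScaled l), PySem.Set.update i (pvImu l)) := by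
  induction l with
  | nil => intro s i; simp [pvScaled, pvImu, PySem.Set.update]
  | cons p l ih =>
    intro s i
    simp only [List.foldl_cons]
    rw [pvStepA_eq]
    by_cases h0 : 0 < p.2
    · rcases hc : pvRank p.1 with _ | ⟨k1, k2⟩
      · simp only [if_pos h0]
        rw [ih]
        simp [pvScaled, pvImu, h0, hc]
      · have hk01 : k1 = 0 ∨ k1 = 1 := by
          unfold pvRank at hc
          split_ifs at hc <;> simp_all
        by_cases hk : k1 = 1
        · simp only [if_pos h0, hk]
          rw [ih]
          simp [pvScaled, pvImu, h0, hc, hk, PySem.Set.update]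
        · have hk0 : k1 = 0 := hk01.resolve_right hk
          simp only [if_pos h0, if_neg hk]
          rw [ih]
          simp [pvScaled, pvImu, h0, hc, hk0, PySem.Set.update]
    · simp only [if_neg h0]
      rw [ih]
      simp [pvScaled, pvImu, h0]

theorem pvMax?_congr {a b : List Int} (h : ∀ x, x ∈ a ↔ x ∈ b) :
    PySem.List.max? a (fun x => x) = PySem.List.max? b (fun x => x) := by
  rcases ha : PySem.List.max? a (fun x => x) with _ | m
  · rcases hb : PySem.List.max? b (fun x => x) with _ | m'
    · rfl
    · have := PySem.List.max?_mem hb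
      rw [PySem.List.max?_eq_none_iff] at ha
      subst ha
      exact absurd ((h m').mpr this) (by simp)
  · rcases hb : PySem.List.max? b (fun x => x) with _ | m'
    · have := PySem.List.max?_mem ha
      rw [PySem.List.max?_eq_none_iff] at hb
      subst hb
      exact absurd ((h m).mp this) (by simp)
    · have hma := PySem.List.max?_mem ha
      have hmb := PySem.List.max?_mem hb
      have h1 := PySem.List.max?_isMax ha m' ((h m').mpr hmb)
      have h2 := PySem.List.max?_isMax hb m ((h m).mp hma)
      simp only [Option.some.injEq]
      omega

theorem pvOfList_nil_iff (xs : List Int) : PySem.Set.ofList xs = [] ↔ xs = [] := by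
  constructor
  · intro h
    rcases xs with _ | ⟨x, t⟩
    · rfl
    · exfalso
      have : x ∈ PySem.Set.ofList (x :: t) := by
        rw [PySem.Set.mem_ofList]; simp
      simp [h] at this
  · intro h; subst h; rfl

-- max over a snoc, in PySem.List.max? form
theorem pvMax?_snoc (s : List Int) (x : Int) :
    PySem.List.max? (s ++ [x]) (fun y => y) =
      some (match PySem.List.max? s (fun y => y) with | some m => max m x | none => x) := by
  rcases s with _ | ⟨a, t⟩
  · simp [PySem.List.max?]
  · simp [PySem.List.max?_id_cons, List.foldl_append]

-- the value B's running maximum reaches, from the scaled / imu lists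
def pvBestOf (s i : List Int) : Option (Int × Int) :=
  match PySem.List.max? s (fun y => y), PySem.List.max? i (fun y => y) with
  | some a, _ => some (1, a)
  | none, some b => some (0, b)
  | none, none => none

theorem pvScaled_append (a b : List (String × Int)) :
    pvScaled (a ++ b) = pvScaled a ++ pvScaled b := by
  simp [pvScaled, List.filter_append, List.filterMap_append]

theorem pvImu_append (a b : List (String × Int)) :
    pvImu (a ++ b) = pvImu a ++ pvImu b := by
  simp [pvImu, List.filter_append, List.filterMap_append]

theorem pvFoldB_eq (l : List (String × Int)) :
    l.foldl pvStepB none = pvBestOf (pvScaled l) (pvImu l) := by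
  induction l using List.reverseRecOn with
  | nil => rfl
  | append_singleton l p ih =>
    rw [List.foldl_append, List.foldl_cons, List.foldl_nil, ih,
        pvScaled_append, pvImu_append]
    unfold pvStepB
    by_cases h0 : p.2 ≤ 0
    · have h0' : ¬ (0 < p.2) := by omega
      have hS : pvScaled [p] = [] := by simp [pvScaled, h0']
      have hI : pvImu [p] = [] := by simp [pvImu, h0']
      simp [h0, hS, hI]
    · have h0' : 0 < p.2 := by omega
      rw [if_neg h0]
      rcases hc : pvRank p.1 with _ | ⟨k1, k2⟩
      · have hS : pvScaled [p] = [] := by simp [pvScaled, h0', hc]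
        have hI : pvImu [p] = [] := by simp [pvImu, h0', hc]
        simp [hS, hI]
      · have hk01 : k1 = 0 ∨ k1 = 1 := by
          unfold pvRank at hc
          split_ifs at hc <;> simp_all
        rcases hk01 with hk0 | hk1
        · subst hk0
          have hS : pvScaled [p] = [] := by simp [pvScaled, h0', hc]
          have hI : pvImu [p] = [k2] := by simp [pvImu, h0', hc]
          rw [hS, hI, List.append_nil]
          unfold pvBestOf
          rcases hs : PySem.List.max? (pvScaled l) (fun y => y) with _ | a
          · rw [pvMax?_snoc]
            rcases hi : PySem.List.max? (pvImu l) (fun y => y) with _ | b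
            · simp
            · unfold pvGtPair
              by_cases hlt : b < k2
              · simp [hlt, max_eq_right (le_of_lt hlt)]
              · have hm : max b k2 = b := max_eq_left (by omega)
                simp [hlt, hm]
          · unfold pvGtPair
            simp [show ¬ ((1:Int) < 0) by decide, show (1:Int) ≠ 0 by decide]
        · subst hk1
          have hS : pvScaled [p] = [k2] := by simp [pvScaled, h0', hc]
          have hI : pvImu [p] = [] := by simp [pvImu, h0', hc]
          rw [hS, hI, List.append_nil]
          unfold pvBestOf
          rw [pvMax?_snoc]
          rcases hs : PySem.List.max? (pvScaled l) (fun y => y) with _ | a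
          · rcases hi : PySem.List.max? (pvImu l) (fun y => y) with _ | b
            · simp
            · unfold pvGtPair
              simp [show (0:Int) < 1 by decide]
          · unfold pvGtPair
            by_cases hlt : a < k2
            · simp [hlt, max_eq_right (le_of_lt hlt)]
            · have hm : max a k2 = a := max_eq_left (by omega)
              simp [hlt, hm]

-- ===== VERDICT (by name: the statement is the Claim_ definition above) =====
theorem infer_imu_count_from_messages_py_spec : Claim_equal_infer_imu_count_from_messages_py := by
  intro mc _
  unfold Spec_infer_imu_count_from_messages_py
  have hA : infer_imu_count_from_messages_py mc =
      match PySem.List.max?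
          (if PySem.Set.ofList (pvScaled mc) ≠ [] then PySem.Set.ofList (pvScaled mc)
           else PySem.Set.ofList (pvImu mc)) (fun x => x) with
      | some m => some (m + 1)
      | none => none := by
    unfold infer_imu_count_from_messages_py
    rw [pvFoldA_eq]
    rfl
  have hB : infer_imu_count_from_messages_py_alt mc =
      match pvBestOf (pvScaled mc) (pvImu mc) with
      | none => none
      | some b => some (b.2 + 1) := by
    unfold infer_imu_count_from_messages_py_alt
    rw [pvFoldB_eq]
  rw [hA, hB]
  have hms : PySem.List.max? (PySem.Set.ofList (pvScaled mc)) (fun x => x)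
      = PySem.List.max? (pvScaled mc) (fun x => x) :=
    pvMax?_congr (fun x => PySem.Set.mem_ofList ..)
  have hmi : PySem.List.max? (PySem.Set.ofList (pvImu mc)) (fun x => x)
      = PySem.List.max? (pvImu mc) (fun x => x) :=
    pvMax?_congr (fun x => PySem.Set.mem_ofList ..)
  unfold pvBestOf
  by_cases hs : pvScaled mc = []
  · rw [if_neg (not_not.mpr ((pvOfList_nil_iff _).mpr hs)), hmi]
    have : PySem.List.max? (pvScaled mc) (fun y => y) = none := by
      rw [PySem.List.max?_eq_none_iff]; exact hs
    rw [this]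
    rcases PySem.List.max? (pvImu mc) (fun y => y) with _ | b <;> simp
  · rw [if_pos (fun h => hs ((pvOfList_nil_iff _).mp h)), hms]
    rcases hsm : PySem.List.max? (pvScaled mc) (fun y => y) with _ | a
    · rw [PySem.List.max?_eq_none_iff] at hsm
      exact absurd hsm hs
    · simp
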